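-- pv_equiv track=rewrite | github.com/DuttaSejuti/LCTracker | 1604-least-number-of-unique-integers-after-k-removals/least-number-of-unique-integers-after-k-removals.py | findLeastNumOfUniqueInts
-- ===== SOURCE A (Python) =====
-- from typing import List
--
-- def findLeastNumOfUniqueInts(arr: List[int], k: int) -> int:
--     new_dict = dict()
--     count = 0
--
--     for n in arr:
--         new_dict[n] = new_dict.get(n, 0) + 1
--
--     new_dict = dict(sorted(new_dict.items(), key = lambda x:x[1]))
--
--     for key in new_dict:
--         if new_dict[key] <= k:
--             k = k - new_dict[key]
--             # del new_dict[key]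
--             count += 1
--         else:
--             k = k - new_dict[key]
--             if k < 0:
--                 break
--
--     return len(new_dict) - count
-- ===== SOURCE B (Python) =====
-- from typing import List
--
-- def findLeastNumOfUniqueInts(arr: List[int], k: int) -> int:
--     # O(n): frequency counts, then a counting-sort bucket pass instead of sorting.
--     freq = {}
--     for n in arr:
--         freq[n] = freq.get(n, 0) + 1
--     buckets = [0] * (len(arr) + 1)
--     for c in freq.values():
--         buckets[c] += 1
--     removed = 0
--     budget = k
--     for c in range(1, len(arr) + 1):
--         if budget <= 0:
--             break
--         take = min(buckets[c], budget // c)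
--         removed += take
--         budget -= take * c
--     return len(freq) - removed
-- ===== Notes on version B (the rewrite author's own statement) =====
-- stated objective: faster
-- what changed: B replaces A's sort of the frequency dict by value (then a greedy scan with a break) with a counting-sort bucket pass over frequencies 1..len(arr), removing whole buckets greedily with floor division, which avoids comparison sorting entirely.
import Mathlib
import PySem

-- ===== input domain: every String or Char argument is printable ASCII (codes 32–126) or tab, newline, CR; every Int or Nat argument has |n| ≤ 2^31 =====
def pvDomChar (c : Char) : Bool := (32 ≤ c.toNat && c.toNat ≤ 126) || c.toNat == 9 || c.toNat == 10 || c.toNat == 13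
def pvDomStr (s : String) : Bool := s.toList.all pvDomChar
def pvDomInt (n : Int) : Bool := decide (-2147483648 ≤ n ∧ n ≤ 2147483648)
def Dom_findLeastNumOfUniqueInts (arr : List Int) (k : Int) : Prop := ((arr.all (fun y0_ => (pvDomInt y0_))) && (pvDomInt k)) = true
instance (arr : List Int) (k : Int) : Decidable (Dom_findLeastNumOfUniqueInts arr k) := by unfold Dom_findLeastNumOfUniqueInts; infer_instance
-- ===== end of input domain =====

-- B replaces A's sort of the frequencies by a counting-sort bucket pass (O(n) instead of O(n log n)).

-- ===== PORT A =====
-- A's second loop (with its break) as structural recursion over the iterated key list.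
def pyLoopA (keys : List Int) (d : PySem.Dict Int Int) (k count : Int) : Int :=
  match keys with
  | [] => count
  | key :: rest =>
    let c := d.getD key 0   -- new_dict[key]; every iterated key is present in the dict
    if c ≤ k then pyLoopA rest d (k - c) (count + 1)
    else if k - c < 0 then count
    else pyLoopA rest d (k - c) count

def findLeastNumOfUniqueInts (arr : List Int) (k : Int) : Int :=
  let d0 := arr.foldl (fun d n => d.insert n (d.getD n 0 + 1)) PySem.Dict.empty
  let d := PySem.Dict.ofList (PySem.List.sorted d0.items (fun x => x.2) false)
  let count := pyLoopA d.keys d k 0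
  (d.size : Int) - count

-- ===== PORT B =====
-- B's bucket loop (with its break) as structural recursion over the range list.
def pyLoopB (cs : List Int) (buckets : List Int) (budget removed : Int) : Int :=
  match cs with
  | [] => removed
  | c :: rest =>
    if budget ≤ 0 then removed
    else
      let take := min (PySem.List.pyGetD buckets c 0) (PySem.Int.floordiv budget c)
      pyLoopB rest buckets (budget - take * c) (removed + take)

def findLeastNumOfUniqueInts_alt (arr : List Int) (k : Int) : Int :=
  let freq := arr.foldl (fun d n => d.insert n (d.getD n 0 + 1)) PySem.Dict.empty
  -- buckets[c] += 1 : every c = freq value lies in 1..len(arr), so the indexing never raises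
  let buckets := freq.values.foldl
    (fun b c => PySem.List.pySetD b c (PySem.List.pyGetD b c 0 + 1))
    (List.replicate (arr.length + 1) 0)
  let removed := pyLoopB (PySem.List.pyRange 1 ((arr.length : Int) + 1) 1) buckets k 0
  (freq.size : Int) - removed

-- ===== PRECONDITION & SPEC =====
def Spec_findLeastNumOfUniqueInts (arr : List Int) (k : Int) (out : Int) : Prop := out = findLeastNumOfUniqueInts_alt arr k
instance (arr : List Int) (k : Int) (out : Int) : Decidable (Spec_findLeastNumOfUniqueInts arr k out) := by unfold Spec_findLeastNumOfUniqueInts; infer_instance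

-- ===== CLAIM (what is proved, stated in full; the proofs are below) =====
def Claim_equal_findLeastNumOfUniqueInts : Prop := ∀ (arr : List Int) (k : Int), Dom_findLeastNumOfUniqueInts arr k → Spec_findLeastNumOfUniqueInts arr k (findLeastNumOfUniqueInts arr k)

-- ===== LEMMAS AND PROOFS =====

-- The common abstraction: remove whole frequency-groups greedily from an ascending list.
def pvGreedy : List Int → Int → Int
  | [], _ => 0
  | c :: cs, k => if c ≤ k then 1 + pvGreedy cs (k - c) else 0

theorem pvGreedy_zero (l : List Int) (k : Int) (h : ∀ x ∈ l, k < x) : pvGreedy l k = 0 := by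
  cases l with
  | nil => rfl
  | cons c cs =>
    have hc := h c (by simp)
    simp [pvGreedy, show ¬ c ≤ k by omega]

theorem pyLoopA_eq (l : List (Int × Int)) (d : PySem.Dict Int Int)
    (hnd : d.keys.Nodup) (hmem : ∀ p ∈ l, p ∈ d.items) (hpos : ∀ p ∈ l, 1 ≤ p.2) :
    ∀ (k count : Int), pyLoopA (l.map Prod.fst) d k count = count + pvGreedy (l.map Prod.snd) k := by
  induction l with
  | nil => intro k count; simp [pyLoopA, pvGreedy]
  | cons p rest ih =>
    intro k count
    have hv : d.getD p.1 0 = p.2 :=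
      PySem.Dict.getD_of_mem_items d (by simpa using hmem p (by simp)) hnd 0
    simp only [List.map_cons, pyLoopA, hv, pvGreedy]
    by_cases hc : p.2 ≤ k
    · rw [if_pos hc, if_pos hc,
        ih (fun q hq => hmem q (by simp [hq])) (fun q hq => hpos q (by simp [hq])) (k - p.2) (count + 1)]
      ring
    · have h1 : 1 ≤ p.2 := hpos p (by simp)
      rw [if_neg hc, if_neg hc, if_pos (by omega)]
      ring

theorem pvBucketGet (vs : List Int) :
    ∀ (b : List Int) (c : Int), (∀ v ∈ vs, 0 ≤ v ∧ v < (b.length : Int)) →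
    0 ≤ c → c < (b.length : Int) →
    PySem.List.pyGetD (vs.foldl (fun b v => PySem.List.pySetD b v (PySem.List.pyGetD b v 0 + 1)) b) c 0
      = PySem.List.pyGetD b c 0 + vs.count c := by
  induction vs with
  | nil => intro b c _ _ _; simp
  | cons v vs ih =>
    intro b c hv hc0 hc1
    have hvb := hv v (by simp)
    have hlen : (PySem.List.pySetD b v (PySem.List.pyGetD b v 0 + 1)).length = b.length :=
      PySem.List.length_pySetD b v _
    simp only [List.foldl_cons]
    rw [ih _ c (by intro x hx; rw [hlen]; exact hv x (by simp [hx])) hc0 (by omega)]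
    rw [PySem.List.pySetD_of_nonneg b _ hvb.1,
      PySem.List.pyGetD_eq_getElem _ 0 hc0 (by simpa using hc1),
      PySem.List.pyGetD_eq_getElem b 0 hc0 hc1,
      List.getElem_set, List.count_cons]
    by_cases hvc : v = c
    · subst hvc
      rw [if_pos (by omega), PySem.List.pyGetD_eq_getElem b 0 hvb.1 hvb.2]
      simp only [beq_self_eq_true, if_true]
      push_cast
      ring
    · rw [if_neg (by omega)]
      simp [hvc]

theorem pvGreedy_block (c : Int) (hc : 1 ≤ c) (m : Nat) (rest : List Int)
    (hrest : ∀ x ∈ rest, c ≤ x) : ∀ (k : Int), 0 ≤ k →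
    pvGreedy (List.replicate m c ++ rest) k
      = min (m : Int) (PySem.Int.floordiv k c) +
        pvGreedy rest (k - min (m : Int) (PySem.Int.floordiv k c) * c) := by
  induction m with
  | zero =>
    intro k hk
    rw [PySem.Int.floordiv_eq_ediv_of_pos (by omega)]
    have h0 : 0 ≤ k / c := Int.ediv_nonneg hk (by omega)
    have hm : min ((0:Nat) : Int) (k / c) = 0 := by omega
    push_cast at hm ⊢
    rw [hm]
    simp
  | succ m ih =>
    intro k hk
    rw [PySem.Int.floordiv_eq_ediv_of_pos (by omega)]
    have hrep : List.replicate (m+1) c ++ rest = c :: (List.replicate m c ++ rest) := by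
      simp [List.replicate_succ]
    rw [hrep]
    by_cases hck : c ≤ k
    · have hq1 : 1 ≤ k / c := by
        rw [Int.le_ediv_iff_mul_le (by omega)]; omega
      have hdiv : (k - c) / c = k / c - 1 := by
        have h := Int.add_mul_ediv_right k (-1) (show c ≠ 0 by omega)
        have : k + -1 * c = k - c := by ring
        rw [this] at h
        omega
      simp only [pvGreedy, if_pos hck]
      rw [ih (k - c) (by omega), PySem.Int.floordiv_eq_ediv_of_pos (by omega), hdiv]
      have hmin : min ((m:Int) + 1) (k / c) = min (m:Int) (k / c - 1) + 1 := by omega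
      push_cast
      rw [hmin]
      set t' := min (m : Int) (k / c - 1) with ht'
      rw [show k - (t' + 1) * c = k - c - t' * c by ring]
      ring
    · have hq0 : k / c = 0 := Int.ediv_eq_zero_of_lt hk (by omega)
      simp only [pvGreedy, if_neg hck, hq0]
      have hmin : min (((m:Int) + 1)) (0:Int) = 0 := by omega
      push_cast
      rw [hmin, show k - 0 * c = k by ring,
        pvGreedy_zero rest k (fun x hx => by have := hrest x hx; omega)]
      ring

theorem pvSortedSplit (l : List Int) (c : Int) (hs : l.Pairwise (· ≤ ·))
    (hlb : ∀ x ∈ l, c ≤ x) :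
    ∃ rest : List Int, l = List.replicate (l.count c) c ++ rest ∧ rest.Pairwise (· ≤ ·) ∧
      (∀ x ∈ rest, c + 1 ≤ x) ∧ ∀ j : Int, c + 1 ≤ j → rest.count j = l.count j := by
  induction l with
  | nil => exact ⟨[], by simp, by simp, by simp, by simp⟩
  | cons x l ih =>
    rcases List.pairwise_cons.mp hs with ⟨hx, hl⟩
    by_cases hxc : x = c
    · subst hxc
      obtain ⟨rest, h1, h2, h3, h4⟩ := ih hl (fun y hy => hlb y (by simp [hy]))
      refine ⟨rest, ?_, h2, h3, ?_⟩
      · rw [List.count_cons_self, List.replicate_succ]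
        simpa using h1
      · intro j hj
        have hxj : ¬ x = j := by omega
        rw [h4 j hj, List.count_cons]
        simp [hxj]
    · have hcx : c + 1 ≤ x := by have := hlb x (by simp); omega
      have hall : ∀ y ∈ x :: l, c + 1 ≤ y := by
        intro y hy
        rcases List.mem_cons.mp hy with rfl | hy
        · exact hcx
        · have := hx y hy; omega
      have hcount : (x :: l).count c = 0 := by
        rw [List.count_eq_zero]
        intro hc
        have := hall c hc; omega
      exact ⟨x :: l, by simp [hcount], hs, hall, fun j hj => rfl⟩

theorem pyLoopB_eq (N : Nat) (buckets : List Int) (n : Nat) :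
    ∀ (c : Int), 1 ≤ c → ((N:Int) + 1 - c).toNat = n →
    ∀ (F : List Int) (budget removed : Int),
    F.Pairwise (· ≤ ·) → (∀ x ∈ F, c ≤ x ∧ x ≤ (N:Int)) →
    (∀ j : Int, c ≤ j → j ≤ (N:Int) → PySem.List.pyGetD buckets j 0 = (F.count j : Int)) →
    pyLoopB (PySem.List.pyRange c ((N:Int)+1) 1) buckets budget removed
      = removed + pvGreedy F budget := by
  induction n with
  | zero =>
    intro c hc hn F budget removed hF hFb hB
    rw [PySem.List.pyRange_one_eq_nil (by omega)]
    have hF0 : F = [] := by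
      cases F with
      | nil => rfl
      | cons x F => exact absurd (hFb x (by simp)) (by omega)
    subst hF0
    simp [pyLoopB, pvGreedy]
  | succ n ih =>
    intro c hc hn F budget removed hF hFb hB
    rw [PySem.List.pyRange_one_cons (show c < (N:Int) + 1 by omega)]
    simp only [pyLoopB]
    by_cases hbud : budget ≤ 0
    · rw [if_pos hbud, pvGreedy_zero F budget (fun x hx => by have := (hFb x hx).1; omega)]
      ring
    · rw [if_neg hbud]
      obtain ⟨rest, hsplit, hrs, hrlb, hrc⟩ := pvSortedSplit F c hF (fun x hx => (hFb x hx).1)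
      have hBc : PySem.List.pyGetD buckets c 0 = (F.count c : Int) := hB c le_rfl (by omega)
      rw [hBc]
      set t := min ((F.count c : Int)) (PySem.Int.floordiv budget c) with ht
      have hg : pvGreedy F budget = t + pvGreedy rest (budget - t * c) := by
        conv_lhs => rw [hsplit]
        exact pvGreedy_block c hc (F.count c) rest
          (fun x hx => by have := hrlb x hx; omega) budget (by omega)
      rw [ih (c+1) (by omega) (by omega) rest (budget - t*c) (removed + t) hrs
        (fun x hx => ⟨by have := hrlb x hx; omega,
          (hFb x (by rw [hsplit]; exact List.mem_append_right _ hx)).2⟩)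
        (fun j hj1 hj2 => by rw [hB j (by omega) hj2, hrc j (by omega)])]
      rw [hg]
      ring

-- properties of the counter's items
theorem pvCounterItemBounds (arr : List Int) (p : Int × Int)
    (hp : p ∈ (PySem.Dict.counter arr).items) : 1 ≤ p.2 ∧ p.2 ≤ (arr.length : Int) := by
  rw [PySem.Dict.items_counter] at hp
  obtain ⟨v, hv, rfl⟩ := List.mem_map.mp hp
  have hvmem : v ∈ arr := (PySem.Set.mem_ofList arr v).mp hv
  have h1 : 0 < arr.count v := List.count_pos_iff.mpr hvmem
  have h2 : arr.count v ≤ arr.length := List.count_le_length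
  constructor <;> simp <;> omega

theorem pvA_eq (arr : List Int) (k : Int) :
    findLeastNumOfUniqueInts arr k
      = (((PySem.Dict.counter arr).items.length : Nat) : Int)
        - pvGreedy ((PySem.List.sorted (PySem.Dict.counter arr).items (fun x => x.2) false).map Prod.snd) k := by
  simp only [findLeastNumOfUniqueInts, PySem.Dict.foldl_insert_getD_add_one_eq_counter]
  set S := PySem.List.sorted (PySem.Dict.counter arr).items (fun x => x.2) false with hS
  have hperm : S.Perm (PySem.Dict.counter arr).items := PySem.List.sorted_perm _ _ _
  have hndS : (S.map Prod.fst).Nodup := by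
    have h1 : (S.map Prod.fst).Perm ((PySem.Dict.counter arr).items.map Prod.fst) := hperm.map _
    have h2 : ((PySem.Dict.counter arr).items.map Prod.fst).Nodup := by
      have h := PySem.Dict.nodup_keys_counter arr
      simp only [PySem.Dict.keys] at h
      exact h
    exact h1.nodup_iff.mpr h2
  have hitems : (PySem.Dict.ofList S).items = S := by
    show (S.foldl (fun d p => d.insert p.1 p.2) PySem.Dict.empty).items = S
    have h := PySem.Dict.items_foldl_insert_fresh S Prod.fst Prod.snd PySem.Dict.empty
      (fun a _ => PySem.Dict.contains_empty _) hndS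
    simpa using h
  have hkeys : (PySem.Dict.ofList S).keys = S.map Prod.fst := by
    simp only [PySem.Dict.keys, hitems]
  have hnd : (PySem.Dict.ofList S).keys.Nodup := PySem.Dict.nodup_keys_ofList S
  have hloop := pyLoopA_eq S (PySem.Dict.ofList S) hnd
      (fun p hp => by rw [hitems]; exact hp)
      (fun p hp => (pvCounterItemBounds arr p (hperm.subset hp)).1)
      k 0
  rw [hkeys, hloop]
  have hsize : (PySem.Dict.ofList S).size = (PySem.Dict.counter arr).items.length := by
    simp only [PySem.Dict.size, hitems]
    exact hperm.length_eq
  rw [hsize]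
  ring

theorem pvB_eq (arr : List Int) (k : Int) :
    findLeastNumOfUniqueInts_alt arr k
      = (((PySem.Dict.counter arr).items.length : Nat) : Int)
        - pvGreedy ((PySem.List.sorted (PySem.Dict.counter arr).items (fun x => x.2) false).map Prod.snd) k := by
  simp only [findLeastNumOfUniqueInts_alt, PySem.Dict.foldl_insert_getD_add_one_eq_counter]
  set S := PySem.List.sorted (PySem.Dict.counter arr).items (fun x => x.2) false with hS
  set F := S.map Prod.snd with hF
  set buckets := (PySem.Dict.counter arr).values.foldl
    (fun b c => PySem.List.pySetD b c (PySem.List.pyGetD b c 0 + 1))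
    (List.replicate (arr.length + 1) (0 : Int)) with hbk
  have hvals : (PySem.Dict.counter arr).values = (PySem.Dict.counter arr).items.map Prod.snd := by
    simp only [PySem.Dict.values]
  have hpermF : F.Perm ((PySem.Dict.counter arr).values) := by
    rw [hvals]
    exact (PySem.List.sorted_perm _ _ _).map _
  have hFb : ∀ x ∈ F, 1 ≤ x ∧ x ≤ (arr.length : Int) := by
    intro x hx
    obtain ⟨p, hp, rfl⟩ := List.mem_map.mp hx
    exact pvCounterItemBounds arr p ((PySem.List.sorted_perm _ _ _).subset hp)
  have hvb : ∀ v ∈ (PySem.Dict.counter arr).values, 0 ≤ v ∧ v < ((arr.length + 1 : Nat) : Int) := by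
    intro v hv
    have := hFb v (hpermF.mem_iff.mpr hv)
    push_cast
    omega
  have hFs : F.Pairwise (· ≤ ·) := PySem.List.sorted_map_key_pairwise _ _
  have hbucket : ∀ j : Int, 1 ≤ j → j ≤ (arr.length : Int) →
      PySem.List.pyGetD buckets j 0 = (F.count j : Int) := by
    intro j h1 h2
    rw [hbk, pvBucketGet _ _ j
      (by intro v hv; have := hvb v hv; simpa using this)
      (by omega) (by simp; omega)]
    rw [PySem.List.pyGetD_eq_getElem _ 0 (by omega) (by simp; omega),
      List.getElem_replicate]
    rw [show ((PySem.Dict.counter arr).values.count j) = F.count j from (hpermF.count_eq j).symm]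
    ring
  have hmain := pyLoopB_eq arr.length buckets arr.length 1 (by norm_num)
    (by omega) F k 0 hFs (fun x hx => hFb x hx) hbucket
  rw [hmain]
  have hlen : (PySem.Dict.counter arr).size = (PySem.Dict.counter arr).items.length := by
    simp only [PySem.Dict.size]
  rw [hlen, hF]
  ring

-- ===== VERDICT (by name: the statement is the Claim_ definition above) =====
theorem findLeastNumOfUniqueInts_spec : Claim_equal_findLeastNumOfUniqueInts := by
  intro arr k _
  unfold Spec_findLeastNumOfUniqueInts
  rw [pvA_eq, pvB_eq]
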